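-- pv_equiv track=rewrite | github.com/Ananyabhatt23/Sample-Python-Programs | sample1pgms.py | larger_strings
-- ===== SOURCE A (Python) =====
-- def larger_strings(sen1,sen2):
--     count1 = 0
--     count2 = 0
--     for i in sen1:
--         count1 = count1+1
--     for j in sen2:
--         count2 = count2+1
--     if(count1<count2):
--         return sen2
--     return sen1
-- ===== SOURCE B (Python) =====
-- def larger_strings(sen1, sen2):
--     return sen2 if len(sen2) > len(sen1) else sen1
-- ===== Notes on version B (the rewrite author's own statement) =====
-- stated objective: simpler
-- what changed: Replaces the two hand-rolled character-counting loops with a single direct len() comparison, keeping ties going to sen1.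
import Mathlib
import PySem

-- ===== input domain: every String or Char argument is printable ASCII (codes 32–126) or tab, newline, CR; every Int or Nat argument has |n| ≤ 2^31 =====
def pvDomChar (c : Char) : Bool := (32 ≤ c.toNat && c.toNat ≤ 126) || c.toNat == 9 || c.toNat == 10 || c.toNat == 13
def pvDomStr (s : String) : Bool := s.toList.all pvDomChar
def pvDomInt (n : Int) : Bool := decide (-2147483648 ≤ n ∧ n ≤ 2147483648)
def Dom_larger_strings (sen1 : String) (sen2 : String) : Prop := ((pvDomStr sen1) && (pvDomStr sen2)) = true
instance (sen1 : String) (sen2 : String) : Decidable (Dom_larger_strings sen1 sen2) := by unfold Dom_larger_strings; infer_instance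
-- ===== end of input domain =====

-- ===== PORT A =====
def larger_strings (sen1 : String) (sen2 : String) : String :=
  let count1 := sen1.toList.foldl (fun acc _ => acc + 1) (0 : Int)
  let count2 := sen2.toList.foldl (fun acc _ => acc + 1) (0 : Int)
  if count1 < count2 then sen2 else sen1

-- ===== PORT B =====
def larger_strings_alt (sen1 : String) (sen2 : String) : String :=
  if sen2.toList.length > sen1.toList.length then sen2 else sen1

-- ===== PRECONDITION & SPEC =====
def Spec_larger_strings (sen1 : String) (sen2 : String) (out : String) : Prop := out = larger_strings_alt sen1 sen2
instance (sen1 : String) (sen2 : String) (out : String) : Decidable (Spec_larger_strings sen1 sen2 out) := by unfold Spec_larger_strings; infer_instance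

-- ===== CLAIM (what is proved, stated in full; the proofs are below) =====
def Claim_equal_larger_strings : Prop := ∀ (sen1 : String) (sen2 : String), Dom_larger_strings sen1 sen2 → Spec_larger_strings sen1 sen2 (larger_strings sen1 sen2)

-- ===== LEMMAS AND PROOFS =====

-- ===== VERDICT (by name: the statement is the Claim_ definition above) =====
lemma foldl_count_eq_length (l : List Char) (n : Int) :
    l.foldl (fun acc _ => acc + 1) n = n + l.length := by
  induction l generalizing n with
  | nil => simp
  | cons c t ih => simp [List.foldl, ih]; ring

theorem larger_strings_spec : Claim_equal_larger_strings := by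
  intro sen1 sen2 _
  unfold Spec_larger_strings larger_strings larger_strings_alt
  simp only [foldl_count_eq_length, zero_add, gt_iff_lt]
  norm_cast
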